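-- pv_equiv track=rewrite | github.com/maxjiang216/nerdle-solver | src/generate.py | valid_numbers
-- ===== SOURCE A (Python) =====
-- from itertools import product as iproduct
--
-- def valid_numbers(length: int, allow_zero: bool = True):
--     """Yield valid numeric tokens. allow_zero=False excludes standalone 0 on LHS."""
--     if length == 1:
--         start = 0 if allow_zero else 1
--         for d in range(start, 10):
--             yield str(d)
--     elif length >= 2:
--         for first in range(1, 10):
--             prefix = str(first)
--             for rest in iproduct('0123456789', repeat=length - 1):
--                 yield prefix + ''.join(rest)
-- ===== SOURCE B (Python) =====
-- def valid_numbers(length: int, allow_zero: bool = True):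
--     """Yield valid numeric tokens. allow_zero=False excludes standalone 0 on LHS."""
--     if length == 1:
--         for d in range(0 if allow_zero else 1, 10):
--             yield str(d)
--     elif length >= 2:
--         for n in range(10 ** (length - 1), 10 ** length):
--             yield str(n)
-- ===== Notes on version B (the rewrite author's own statement) =====
-- stated objective: idiomatic
-- what changed: The nested first-digit loop plus itertools.product over digit characters is replaced by a single integer range enumeration 10**(length-1)..10**length-1 rendered with str(), which produces exactly the same strings in the same order.
import Mathlib
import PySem

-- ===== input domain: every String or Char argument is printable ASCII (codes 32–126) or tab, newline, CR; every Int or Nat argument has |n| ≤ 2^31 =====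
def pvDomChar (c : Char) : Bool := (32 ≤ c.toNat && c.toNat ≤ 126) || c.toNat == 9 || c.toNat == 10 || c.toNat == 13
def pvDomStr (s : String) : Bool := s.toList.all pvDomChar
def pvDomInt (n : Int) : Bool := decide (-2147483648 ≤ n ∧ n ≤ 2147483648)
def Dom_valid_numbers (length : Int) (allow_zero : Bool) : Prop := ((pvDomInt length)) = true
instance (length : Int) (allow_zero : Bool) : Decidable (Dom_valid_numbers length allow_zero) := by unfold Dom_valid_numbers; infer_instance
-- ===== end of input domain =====

-- B replaces A's first-digit loop + itertools.product over digit characters by a single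
-- integer enumeration range(10^(length-1), 10^length) rendered with str(); same output order.


-- ===== PORT A =====
-- iproduct('0123456789', repeat=k): k-tuples of digit chars, leftmost component varying slowest
def pvProdRep : Nat → List (List Char)
  | 0 => [[]]
  | n + 1 => "0123456789".toList.flatMap (fun c => (pvProdRep n).map (fun rest => c :: rest))

def valid_numbers (length : Int) (allow_zero : Bool) : List String :=
  if length = 1 then
    (PySem.List.pyRange (if allow_zero then 0 else 1) 10 1).map (fun d => PySem.Int.toStr d)
  else if length ≥ 2 then
    -- prefix + ''.join(rest): string concatenation done on the char lists (exact)
    (PySem.List.pyRange 1 10 1).flatMap (fun first =>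
      (pvProdRep (length - 1).toNat).map (fun rest =>
        String.ofList ((PySem.Int.toStr first).toList ++ rest)))
  else []

-- ===== PORT B =====
def valid_numbers_alt (length : Int) (allow_zero : Bool) : List String :=
  if length = 1 then
    (PySem.List.pyRange (if allow_zero then 0 else 1) 10 1).map (fun d => PySem.Int.toStr d)
  else if length ≥ 2 then
    (PySem.List.pyRange ((10 : Int) ^ (length - 1).toNat) ((10 : Int) ^ length.toNat) 1).map
      (fun n => PySem.Int.toStr n)
  else []

-- ===== PRECONDITION & SPEC =====
def Spec_valid_numbers (length : Int) (allow_zero : Bool) (out : List String) : Prop := out = valid_numbers_alt length allow_zero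
instance (length : Int) (allow_zero : Bool) (out : List String) : Decidable (Spec_valid_numbers length allow_zero out) := by unfold Spec_valid_numbers; infer_instance

-- ===== CLAIM (what is proved, stated in full; the proofs are below) =====
def Claim_equal_valid_numbers : Prop := ∀ (length : Int) (allow_zero : Bool), Dom_valid_numbers length allow_zero → Spec_valid_numbers length allow_zero (valid_numbers length allow_zero)

-- ===== LEMMAS AND PROOFS =====

-- the accumulator of Nat.toDigitsCore is appended on the right (fuel > n is enough)
lemma pv_tdc_acc : ∀ (fuel n : Nat), n < fuel → ∀ ds : List Char,
    Nat.toDigitsCore 10 fuel n ds = Nat.toDigitsCore 10 fuel n [] ++ ds := by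
  intro fuel
  induction fuel with
  | zero => intro n h; omega
  | succ f ih =>
    intro n h ds
    simp only [Nat.toDigitsCore]
    by_cases hq : n / 10 = 0
    · simp [hq]
    · simp only [hq]
      have hlt : n / 10 < f := by omega
      rw [ih _ hlt, ih _ hlt [Nat.digitChar (n % 10)]]
      simp

-- fuel irrelevance for Nat.toDigitsCore with empty accumulator
lemma pv_tdc_fuel : ∀ (f1 f2 n : Nat), n < f1 → n < f2 →
    Nat.toDigitsCore 10 f1 n [] = Nat.toDigitsCore 10 f2 n [] := by
  intro f1
  induction f1 with
  | zero => intro f2 n h; omega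
  | succ f ih =>
    intro f2 n h1 h2
    cases f2 with
    | zero => omega
    | succ g =>
      simp only [Nat.toDigitsCore]
      by_cases hq : n / 10 = 0
      · simp [hq]
      · simp only [hq]
        have hf : n / 10 < f := by omega
        have hg : n / 10 < g := by omega
        rw [pv_tdc_acc f _ hf, pv_tdc_acc g _ hg, ih g _ hf hg]

-- peeling the last decimal digit off a multi-digit number
lemma pv_toDigits_step (p d : Nat) (hp : 1 ≤ p) (hd : d < 10) :
    Nat.toDigits 10 (10 * p + d) = Nat.toDigits 10 p ++ [Nat.digitChar d] := by
  unfold Nat.toDigits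
  simp only [Nat.toDigitsCore]
  have hmod : (10 * p + d) % 10 = d := by omega
  have hdiv : (10 * p + d) / 10 = p := by omega
  rw [hmod, hdiv]
  have hp0 : p ≠ 0 := by omega
  simp only [if_neg hp0]
  rw [pv_tdc_acc _ p (by omega), pv_tdc_fuel (10 * p + d) (p + 1) p (by omega) (by omega)]
  simp [Nat.toDigitsCore]

-- str(10*p + d) = str(p) + str-digit d for p ≥ 1, 0 ≤ d < 10 (Int version)
lemma pv_toChars_step (p : Int) (d : Nat) (hp : 1 ≤ p) (hd : d < 10) :
    PySem.Int.toChars (10 * p + (d : Int)) = PySem.Int.toChars p ++ [Nat.digitChar d] := by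
  unfold PySem.Int.toChars
  have h1 : ¬ (10 * p + (d : Int) < 0) := by omega
  have h2 : ¬ (p < 0) := by omega
  rw [if_neg h1, if_neg h2]
  have h3 : (10 * p + (d : Int)).toNat = 10 * p.toNat + d := by omega
  rw [h3, pv_toDigits_step p.toNat d (by omega) hd]

-- splitting an integer range into 10^k-sized chunks
lemma pv_chunk (k : Nat) (q : Int) : ∀ j : Nat,
    (PySem.List.pyRange (q * 10 ^ k) ((q + j) * 10 ^ k) 1).map (fun n => PySem.Int.toStr n)
      = (List.range j).flatMap (fun i : Nat =>
          (PySem.List.pyRange ((q + (i : Int)) * 10 ^ k) ((q + (i : Int) + 1) * 10 ^ k) 1).map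
            (fun n => PySem.Int.toStr n)) := by
  have hm : ∀ i j : Int, i ≤ j → i * 10 ^ k ≤ j * 10 ^ k := by
    intro i j h; exact mul_le_mul_of_nonneg_right h (by positivity)
  intro j
  induction j with
  | zero =>
    rw [show ((q + ((0:Nat) : Int)) * 10 ^ k) = q * 10 ^ k by push_cast; ring,
      PySem.List.pyRange_one_eq_nil le_rfl]
    simp
  | succ j ih =>
    rw [List.range_succ, List.flatMap_append, ← ih,
      PySem.List.pyRange_one_append (q * 10 ^ k) ((q + j) * 10 ^ k) ((q + (j+1:Nat)) * 10 ^ k)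
        (hm _ _ (by omega)) (hm _ _ (by push_cast; omega)),
      List.map_append]
    simp only [List.flatMap_cons, List.flatMap_nil, List.append_nil]
    push_cast
    ring_nf

-- core: the digit-tuple product with an integer prefix p ≥ 1 IS the range p*10^k .. (p+1)*10^k
lemma pv_core (k : Nat) : ∀ p : Int, 1 ≤ p →
    (pvProdRep k).map (fun rest => String.ofList (PySem.Int.toChars p ++ rest))
      = (PySem.List.pyRange (p * 10 ^ k) ((p + 1) * 10 ^ k) 1).map (fun n => PySem.Int.toStr n) := by
  induction k with
  | zero =>
    intro p hp
    simp [pvProdRep, PySem.List.pyRange_one_singleton, PySem.Int.toStr]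
  | succ k ih =>
    intro p hp
    have step : ∀ d : Nat, d < 10 →
        (pvProdRep k).map (fun rest =>
            String.ofList (PySem.Int.toChars p ++ Nat.digitChar d :: rest))
          = (PySem.List.pyRange ((10 * p + (d : Int)) * 10 ^ k) ((10 * p + (d : Int) + 1) * 10 ^ k) 1).map
              (fun n => PySem.Int.toStr n) := by
      intro d hd
      rw [← ih (10 * p + (d : Int)) (by omega)]
      apply List.map_congr_left
      intro rest _
      rw [pv_toChars_step p d hp hd]
      simp
    have hd : "0123456789".toList = [Nat.digitChar 0, Nat.digitChar 1, Nat.digitChar 2,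
        Nat.digitChar 3, Nat.digitChar 4, Nat.digitChar 5, Nat.digitChar 6,
        Nat.digitChar 7, Nat.digitChar 8, Nat.digitChar 9] := rfl
    have hb1 : p * 10 ^ (k+1) = (10 * p) * 10 ^ k := by ring
    have hb2 : (p + 1) * 10 ^ (k+1) = ((10 * p) + (10:Nat)) * 10 ^ k := by push_cast; ring
    rw [hb1, hb2, pv_chunk k (10 * p) 10]
    simp only [pvProdRep, hd, List.flatMap_cons, List.flatMap_nil, List.append_nil,
      List.map_append, List.map_map, Function.comp_def,
      show List.range 10 = [0,1,2,3,4,5,6,7,8,9] from rfl]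
    rw [step 0 (by norm_num), step 1 (by norm_num), step 2 (by norm_num), step 3 (by norm_num),
      step 4 (by norm_num), step 5 (by norm_num), step 6 (by norm_num), step 7 (by norm_num),
      step 8 (by norm_num), step 9 (by norm_num)]

-- ===== VERDICT (by name: the statement is the Claim_ definition above) =====
theorem valid_numbers_spec : Claim_equal_valid_numbers := by
  intro length allow_zero _
  unfold Spec_valid_numbers valid_numbers valid_numbers_alt
  by_cases h1 : length = 1
  · simp [h1]
  · rw [if_neg h1, if_neg h1]
    by_cases h2 : length ≥ 2
    · rw [if_pos h2, if_pos h2]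
      set n := (length - 1).toNat with hn
      have hlen : length.toNat = n + 1 := by omega
      rw [hlen, PySem.List.pyRange_one 1 10]
      rw [show ((10 - 1 : Int)).toNat = 9 from rfl]
      rw [List.flatMap_map]
      have hbody : ∀ i : Nat,
          (pvProdRep n).map (fun rest =>
              String.ofList ((PySem.Int.toStr ((1 : Int) + (i : Int))).toList ++ rest))
            = (PySem.List.pyRange (((1 : Int) + (i : Int)) * 10 ^ n) (((1 : Int) + (i : Int) + 1) * 10 ^ n) 1).map
                (fun m => PySem.Int.toStr m) := by
        intro i
        simp only [PySem.Int.toList_toStr]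
        exact pv_core n (1 + (i : Int)) (by omega)
      rw [List.flatMap_congr (fun i _ => hbody i), ← pv_chunk n 1 9]
      rw [show ((1 : Int) + (9:Nat)) * 10 ^ n = 10 ^ (n + 1) by push_cast; ring,
        show ((1 : Int)) * 10 ^ n = 10 ^ n by ring]
    · rw [if_neg h2, if_neg h2]
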